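-- pv_equiv track=rewrite | github.com/jmgamboa/coding-exercises | anagram.py | solution
-- ===== SOURCE A (Python) =====
-- def solution(A, B):
--     if len(A) == 0 or len(B) == 0:
--         return max(len(A), len(B))
--
--     letter_count = 0
--     A_dict = {}
--     B_dict = {}
--
--     for i in A:
--         if i not in A_dict:
--             A_dict[i] = 1
--         else:
--             A_dict[i] += 1
--     for i in B:
--        if i not in B_dict:
--            B_dict[i] = 1
--        else:
--            B_dict[i] += 1
--
--     for k, v in A_dict.items():
--         if k not in B_dict:
--             letter_count += v
--         else:
--             if v > B_dict[k]:
--                 letter_count += v - B_dict[k]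
--
--     for k, v in B_dict.items():
--         if k not in A_dict:
--             letter_count += v
--         else:
--             if v > A_dict[k]:
--                 letter_count += v - A_dict[k]
--
--     return letter_count
-- ===== SOURCE B (Python) =====
-- def solution(A, B):
--     common = sum(min(A.count(c), B.count(c)) for c in set(A))
--     return len(A) + len(B) - 2 * common
-- ===== Notes on version B (the rewrite author's own statement) =====
-- stated objective: simpler
-- what changed: Replaces the two hand-built count dicts and the two asymmetric per-key difference-summing passes by one overlap sum (min of per-character counts over the distinct characters of A) and the closed form len(A)+len(B)-2*common, which also subsumes the empty-string guard.
import Mathlib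
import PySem

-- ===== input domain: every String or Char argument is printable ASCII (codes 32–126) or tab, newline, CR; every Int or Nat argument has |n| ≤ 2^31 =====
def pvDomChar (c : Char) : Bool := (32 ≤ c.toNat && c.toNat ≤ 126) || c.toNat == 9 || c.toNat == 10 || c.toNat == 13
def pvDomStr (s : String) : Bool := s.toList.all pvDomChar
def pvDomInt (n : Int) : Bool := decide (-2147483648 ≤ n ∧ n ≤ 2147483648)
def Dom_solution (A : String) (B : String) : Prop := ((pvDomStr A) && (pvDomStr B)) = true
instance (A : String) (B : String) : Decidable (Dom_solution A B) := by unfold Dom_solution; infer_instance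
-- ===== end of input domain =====

-- B replaces A's two count-dicts and two asymmetric per-key difference passes by one
-- overlap sum over A's distinct characters and the closed form len(A)+len(B)-2*common
-- (which also subsumes the empty-string guard): objective simpler.


-- ===== PORT A =====
def solution (A : String) (B : String) : Int :=
  let la := A.toList
  let lb := B.toList
  if la.length = 0 ∨ lb.length = 0 then (max la.length lb.length : Int)
  else
    let Ad := la.foldl (fun d i => if d.contains i then d.insert i (d.getD i 0 + 1) else d.insert i 1)
      (PySem.Dict.empty : PySem.Dict Char Int)
    let Bd := lb.foldl (fun d i => if d.contains i then d.insert i (d.getD i 0 + 1) else d.insert i 1)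
      (PySem.Dict.empty : PySem.Dict Char Int)
    let c1 := Ad.items.foldl (fun acc kv =>
      if !(Bd.contains kv.1) then acc + kv.2
      else if kv.2 > Bd.getD kv.1 0 then acc + (kv.2 - Bd.getD kv.1 0) else acc) 0
    Bd.items.foldl (fun acc kv =>
      if !(Ad.contains kv.1) then acc + kv.2
      else if kv.2 > Ad.getD kv.1 0 then acc + (kv.2 - Ad.getD kv.1 0) else acc) c1

-- ===== PORT B =====
def solution_alt (A : String) (B : String) : Int :=
  let la := A.toList
  let lb := B.toList
  let common := ((PySem.Set.ofList la).map
    (fun c => min ((la.count c : Int)) ((lb.count c : Int)))).sum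
  (la.length : Int) + (lb.length : Int) - 2 * common

-- ===== PRECONDITION & SPEC =====
def Spec_solution (A : String) (B : String) (out : Int) : Prop := out = solution_alt A B
instance (A : String) (B : String) (out : Int) : Decidable (Spec_solution A B out) := by unfold Spec_solution; infer_instance

-- ===== CLAIM (what is proved, stated in full; the proofs are below) =====
def Claim_equal_solution : Prop := ∀ (A : String) (B : String), Dom_solution A B → Spec_solution A B (solution A B)

-- ===== LEMMAS AND PROOFS =====

-- A's counting loop (branching on membership) builds exactly Counter(l).
theorem pv_build_eq_counter (l : List Char) :
    l.foldl (fun d i => if d.contains i then d.insert i (d.getD i 0 + 1) else d.insert i 1)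
      (PySem.Dict.empty : PySem.Dict Char Int) = PySem.Dict.counter l := by
  rw [← PySem.Dict.foldl_insert_getD_add_one_eq_counter]
  congr 1
  funext d i
  by_cases h : d.contains i = true
  · simp [h]
  · have hget : d.get? i = none := by
      have := PySem.Dict.contains_eq_isSome_get? d i
      cases hg : d.get? i with
      | none => rfl
      | some v => rw [hg] at this; simp at this; exact absurd this h
    simp [h, PySem.Dict.getD, hget]

-- the per-key contribution of A's difference pass is count − overlap
theorem pv_step_val (xs ys : List Char) (acc : Int) (k : Char) :
    (if !(ys.contains k) then acc + (xs.count k : Int)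
     else if (xs.count k : Int) > (ys.count k : Int)
          then acc + ((xs.count k : Int) - (ys.count k : Int)) else acc)
    = acc + ((xs.count k : Int) - min (xs.count k : Int) (ys.count k : Int)) := by
  by_cases h : k ∈ ys
  · have hc : ys.contains k = true := List.contains_iff_mem.mpr h
    rw [min_def]
    split_ifs <;> simp_all
    omega
  · have hc : ys.contains k = false := by simp [h]
    have h0 : ys.count k = 0 := List.count_eq_zero_of_not_mem h
    rw [min_def]
    split_ifs <;> simp_all

-- a sum of a function over set(xs) is the Finset sum over xs's support
theorem pv_set_sum (xs : List Char) (g : Char → Int) :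
    ((PySem.Set.ofList xs).map g).sum = ∑ k ∈ xs.toFinset, g k := by
  rw [← List.sum_toFinset _ (PySem.Set.nodup_ofList xs)]
  apply Finset.sum_congr _ (fun _ _ => rfl)
  apply Finset.ext
  intro a
  simp [PySem.Set.mem_ofList]

-- the counts of xs summed over xs's support give xs's length (in Int)
theorem pv_sum_count (xs : List Char) :
    ∑ k ∈ xs.toFinset, (xs.count k : Int) = (xs.length : Int) := by
  have hn : ∑ k ∈ xs.toFinset, xs.count k = xs.length := by
    simp
  rw [← hn]
  push_cast
  rfl

-- one difference pass of A equals length − overlap (as a Finset sum)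
theorem pv_pass (xs ys : List Char) (acc : Int) :
    (PySem.Dict.counter xs).items.foldl (fun a kv =>
      if !((PySem.Dict.counter ys).contains kv.1) then a + kv.2
      else if kv.2 > (PySem.Dict.counter ys).getD kv.1 0 then a + (kv.2 - (PySem.Dict.counter ys).getD kv.1 0) else a) acc
    = acc + (xs.length : Int) - ∑ k ∈ xs.toFinset, min (xs.count k : Int) (ys.count k : Int) := by
  rw [PySem.Dict.items_counter, List.foldl_map]
  have hstep : (fun (a : Int) (k : Char) =>
      if !((PySem.Dict.counter ys).contains k) then a + ((xs.count k : Int))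
      else if ((xs.count k : Int)) > (PySem.Dict.counter ys).getD k 0
           then a + (((xs.count k : Int)) - (PySem.Dict.counter ys).getD k 0) else a)
      = fun a k => a + ((xs.count k : Int) - min ((xs.count k : Int)) ((ys.count k : Int))) := by
    funext a k
    rw [PySem.Dict.contains_counter, PySem.Dict.getD_counter]
    exact pv_step_val xs ys a k
  show List.foldl (fun (a : Int) (k : Char) =>
      if !((PySem.Dict.counter ys).contains k) then a + ((xs.count k : Int))
      else if ((xs.count k : Int)) > (PySem.Dict.counter ys).getD k 0
           then a + (((xs.count k : Int)) - (PySem.Dict.counter ys).getD k 0) else a) acc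
      (PySem.Set.ofList xs) = _
  rw [hstep, PySem.List.foldl_add, pv_set_sum, Finset.sum_sub_distrib, pv_sum_count]
  ring

-- off xs's support the overlap term vanishes
theorem pv_min_zero_off (xs ys : List Char) :
    ∀ x ∈ xs.toFinset ∪ ys.toFinset, x ∉ xs.toFinset →
      min ((xs.count x : Int)) ((ys.count x : Int)) = 0 := by
  intro x _ hx
  have h0 : xs.count x = 0 := List.count_eq_zero_of_not_mem (by simpa using hx)
  rw [h0]
  exact min_eq_left (Int.natCast_nonneg _)

-- the two overlap sums agree (extend both to the union of supports)
theorem pv_min_sum_comm (xs ys : List Char) :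
    ∑ k ∈ xs.toFinset, min (xs.count k : Int) (ys.count k : Int)
    = ∑ k ∈ ys.toFinset, min (ys.count k : Int) (xs.count k : Int) := by
  rw [Finset.sum_subset (Finset.subset_union_left (s₂ := ys.toFinset)) (pv_min_zero_off xs ys),
      Finset.sum_subset (Finset.subset_union_left (s₂ := xs.toFinset)) (pv_min_zero_off ys xs),
      Finset.union_comm]
  exact Finset.sum_congr rfl (fun x _ => min_comm _ _)

-- ===== VERDICT (by name: the statement is the Claim_ definition above) =====
theorem solution_spec : Claim_equal_solution := by
  intro A B _
  unfold Spec_solution solution solution_alt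
  by_cases hg : A.toList.length = 0 ∨ B.toList.length = 0
  · simp only [pv_set_sum, if_pos hg]
    have hc : ∑ k ∈ A.toList.toFinset,
        min ((A.toList.count k : Int)) ((B.toList.count k : Int)) = 0 := by
      apply Finset.sum_eq_zero
      intro k hk
      rcases hg with hg | hg
      · rw [List.length_eq_zero_iff.mp hg] at hk; simp at hk
      · rw [List.length_eq_zero_iff.mp hg, List.count_nil]
        exact min_eq_right (Int.natCast_nonneg _)
    rw [hc]
    rcases hg with hg | hg <;> rw [hg] <;> push_cast [Nat.cast_max] <;> omega
  · simp only [pv_build_eq_counter, if_neg hg, pv_pass, pv_set_sum]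
    rw [pv_min_sum_comm B.toList A.toList]
    ring
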